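-- pv_equiv track=rewrite | github.com/chadchiukc/machineLearning | try.py | reduce_index
-- ===== SOURCE A (Python) =====
-- def reduce_index(intermediate):
--     temp_list = []
--     for key, listOfValues in intermediate.items():
--         doc_list = []
--         for doc in dict(listOfValues).keys():
--             sum = 0
--             for values in listOfValues:
--                 if values[0] == doc:
--                     sum += 1
--             doc_list.append((doc, sum))
--         temp_list.append((key, doc_list))
--     return temp_list
-- ===== SOURCE B (Python) =====
-- def reduce_index(intermediate):
--     def tally(pairs):
--         if not pairs:
--             return []
--         d = pairs[0][0]
--         same = [q for q in pairs if q[0] == d]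
--         rest = [q for q in pairs if q[0] != d]
--         return [(d, len(same))] + tally(rest)
--     return [(key, tally(listOfValues)) for key, listOfValues in intermediate.items()]
-- ===== Notes on version B (the rewrite author's own statement) =====
-- stated objective: alternative
-- what changed: Replaces A's dict-of-keys construction plus a per-distinct-doc rescan of the whole value list with a dict-free partition recursion: take the first doc, count its group by one filter, recurse on the remaining pairs (first-occurrence order preserved by construction).
import Mathlib
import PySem

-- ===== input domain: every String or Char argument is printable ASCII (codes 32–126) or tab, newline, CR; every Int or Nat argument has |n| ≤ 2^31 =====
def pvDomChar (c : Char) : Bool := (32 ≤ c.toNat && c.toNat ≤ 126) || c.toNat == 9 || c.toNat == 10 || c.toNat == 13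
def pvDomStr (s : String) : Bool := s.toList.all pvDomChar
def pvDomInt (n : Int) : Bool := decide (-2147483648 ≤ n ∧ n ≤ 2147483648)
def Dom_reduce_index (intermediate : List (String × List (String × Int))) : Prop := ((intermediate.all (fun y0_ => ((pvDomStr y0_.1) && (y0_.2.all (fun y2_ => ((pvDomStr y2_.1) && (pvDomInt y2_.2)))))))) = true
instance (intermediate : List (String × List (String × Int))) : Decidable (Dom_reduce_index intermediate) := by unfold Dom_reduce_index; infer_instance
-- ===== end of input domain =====

-- B replaces A's dict-of-keys plus per-distinct-doc rescan with a dict-free partition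
-- recursion: take the first doc, count its group by filtering, recurse on the remainder.

-- ===== PORT A =====
def reduce_index (intermediate : List (String × List (String × Int))) : List (String × (List (String × Int))) :=
  intermediate.foldl (fun temp_list kl =>
    -- dict(listOfValues).keys(): build a dict from the pairs, take its keys
    let d := kl.2.foldl (fun d p => d.insert p.1 p.2) (PySem.Dict.empty (κ := String) (ν := Int))
    let doc_list := d.keys.foldl (fun doc_list doc =>
      -- sum = 0; for values in listOfValues: if values[0] == doc: sum += 1
      let s := kl.2.foldl (fun s p => if p.1 == doc then s + 1 else s) (0 : Int)
      doc_list ++ [(doc, s)]) []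
    temp_list ++ [(kl.1, doc_list)]) []

-- ===== PORT B =====
-- B's helper tally(pairs): head doc's group size by filtering, then recurse on the non-matching rest
def pvTally : List (String × Int) → List (String × Int)
  | [] => []
  | p :: rest =>
    (p.1, (((p :: rest).filter (fun q => q.1 == p.1)).length : Int)) ::
      pvTally ((p :: rest).filter (fun q => q.1 != p.1))
  termination_by l => l.length
  decreasing_by
    simp only [List.filter_cons, bne_self_eq_false]
    exact Nat.lt_succ_of_le (List.length_filter_le _ _)

def reduce_index_alt (intermediate : List (String × List (String × Int))) : List (String × (List (String × Int))) :=
  intermediate.map (fun kl => (kl.1, pvTally kl.2))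

-- ===== PRECONDITION & SPEC =====
def Spec_reduce_index (intermediate : List (String × List (String × Int))) (out : List (String × (List (String × Int)))) : Prop := out = reduce_index_alt intermediate
instance (intermediate : List (String × List (String × Int))) (out : List (String × (List (String × Int)))) : Decidable (Spec_reduce_index intermediate out) := by unfold Spec_reduce_index; infer_instance

-- ===== CLAIM (what is proved, stated in full; the proofs are below) =====
def Claim_equal_reduce_index : Prop := ∀ (intermediate : List (String × List (String × Int))), Dom_reduce_index intermediate → Spec_reduce_index intermediate (reduce_index intermediate)

-- ===== LEMMAS AND PROOFS =====

-- A's inner counting loop over the pair list is List.count on the list of first components.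
theorem count_loop_eq (lv : List (String × Int)) (doc : String) :
    lv.foldl (fun s p => if p.1 == doc then s + 1 else s) (0 : Int)
      = ((lv.map Prod.fst).count doc : Int) := by
  have h := PySem.List.foldl_count_if (fun x => x == doc) (lv.map Prod.fst) 0
  rw [List.foldl_map] at h
  rw [h, List.count]
  simp

-- dropping one element from a first-occurrence dedup is dedup of the filtered list
theorem discard_ofList_eq_ofList_filter {α : Type} [DecidableEq α] (d : α) (ks : List α) :
    PySem.Set.discard (PySem.Set.ofList ks) d = PySem.Set.ofList (ks.filter (fun k => k ≠ d)) := by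
  induction ks with
  | nil => rfl
  | cons x ks ih =>
    simp only [PySem.Set.discard, beq_eq_decide, decide_not] at ih
    by_cases hx : x = d
    · subst hx
      simp [PySem.Set.ofList_cons, PySem.Set.discard]
      simpa [beq_eq_decide, decide_not] using ih
    · simp [PySem.Set.ofList_cons, PySem.Set.discard, hx, beq_eq_decide, decide_not]
      rw [← ih, List.filter_filter]
      congr 1
      funext a
      rw [Bool.and_comm]

-- B's partition recursion lists each first-occurrence-ordered distinct doc with its total count
theorem tally_eq (lv : List (String × Int)) :
    pvTally lv
      = (PySem.Set.ofList (lv.map Prod.fst)).map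
          (fun k => (k, ((lv.map Prod.fst).count k : Int))) := by
  induction lv using pvTally.induct with
  | case1 => simp [pvTally]
  | case2 p rest ih =>
    rw [pvTally]
    have hks : (p :: rest).map Prod.fst = p.1 :: rest.map Prod.fst := rfl
    rw [hks, PySem.Set.ofList_cons, discard_ofList_eq_ofList_filter, List.map_cons]
    congr 1
    · -- head: the filtered group's length is the count of p.1 over all first components
      have h : ((p :: rest).filter (fun q => q.1 == p.1)).length
          = List.count p.1 ((p :: rest).map Prod.fst) := by
        rw [List.count, List.countP_map]
        exact (List.countP_eq_length_filter).symm
      rw [hks] at h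
      exact congrArg _ (congrArg _ h)
    · -- tail: the recursive call handles exactly the other docs, counts unchanged
      rw [ih]
      have hmapf : (((p :: rest).filter (fun q => q.1 != p.1)).map Prod.fst)
          = (rest.map Prod.fst).filter (fun k => k ≠ p.1) := by
        simp only [List.filter_cons, bne_self_eq_false, Bool.false_eq_true, if_false]
        rw [show (fun q : String × Int => q.1 != p.1) = ((fun k => k != p.1) ∘ Prod.fst) from rfl,
           ← List.filter_map]
        congr 1
        funext a
        simp [bne, beq_eq_decide, decide_not]
      rw [hmapf]
      refine List.map_congr_left (fun k hk => ?_)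
      have hkne : k ≠ p.1 := by
        have := (PySem.Set.mem_ofList _ _).mp hk
        simp at this
        exact this.2
      have hcf : List.count k ((rest.map Prod.fst).filter (fun x => decide (x ≠ p.1)))
          = List.count k (rest.map Prod.fst) := List.count_filter (by simp [hkne])
      rw [hcf, List.count_cons_of_ne hkne.symm]

-- per-key equality: A's doc_list equals B's tally
theorem doc_list_eq (lv : List (String × Int)) :
    (lv.foldl (fun d p => d.insert p.1 p.2) (PySem.Dict.empty (κ := String) (ν := Int))).keys.foldl
        (fun doc_list doc =>
          doc_list ++ [(doc, lv.foldl (fun s p => if p.1 == doc then s + 1 else s) (0 : Int))]) []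
      = pvTally lv := by
  rw [tally_eq,
      PySem.List.foldl_append_singleton_eq_map,
      PySem.Dict.keys_foldl_insert_key, PySem.Dict.keys_empty,
      PySem.Set.update_nil_left, List.nil_append]
  exact List.map_congr_left (fun doc _ => by rw [count_loop_eq])

-- ===== VERDICT (by name: the statement is the Claim_ definition above) =====
theorem reduce_index_spec : Claim_equal_reduce_index := by
  intro intermediate _
  unfold Spec_reduce_index reduce_index reduce_index_alt
  rw [PySem.List.foldl_append_singleton_eq_map]
  simp only [doc_list_eq, List.nil_append]
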